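-- pv_equiv track=rewrite | github.com/thaminmg/leetcode | cs455/hw2.py | count_pairs_with_threshold
-- ===== SOURCE A (Python) =====
-- def count_pairs_with_threshold(arr, T):
--     def merge_count(left, mid, right):
--         count = 0
--         i, j = left, mid + 1
--
--         while i <= mid:
--             while j <= right and arr[j] - arr[i] < T:
--                 j += 1
--             count += (j - mid - 1)
--             i += 1
--         return count
--
--     def dc_count(left, right):
--         if left == right:
--             return 0
--         mid = (left + right) // 2
--         lcount = dc_count(left, mid)
--         rcount = dc_count(mid + 1, right)
--         mcount = merge_count(left, mid, right)
--         return lcount + rcount + mcount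
--
--     return dc_count(0, len(arr) - 1)
-- ===== SOURCE B (Python) =====
-- def count_pairs_with_threshold(arr, T):
--     def cross_count(left, mid, right):
--         count = 0
--         i, j = left, mid + 1
--         while i <= mid:
--             if j <= right and arr[j] - arr[i] < T:
--                 j += 1
--             else:
--                 count += j - mid - 1
--                 i += 1
--         return count
--
--     total = 0
--     stack = [(0, len(arr) - 1)]
--     while stack:
--         left, right = stack.pop()
--         if left < right:
--             mid = (left + right) // 2
--             total += cross_count(left, mid, right)
--             stack.append((left, mid))
--             stack.append((mid + 1, right))
--     return total
-- ===== Notes on version B (the rewrite author's own statement) =====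
-- stated objective: alternative
-- what changed: A's divide-and-conquer recursion is replaced by an iterative explicit work stack of intervals, and merge_count's nested two-pointer while-loops are flattened into a single loop with one branch per step.
import Mathlib
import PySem

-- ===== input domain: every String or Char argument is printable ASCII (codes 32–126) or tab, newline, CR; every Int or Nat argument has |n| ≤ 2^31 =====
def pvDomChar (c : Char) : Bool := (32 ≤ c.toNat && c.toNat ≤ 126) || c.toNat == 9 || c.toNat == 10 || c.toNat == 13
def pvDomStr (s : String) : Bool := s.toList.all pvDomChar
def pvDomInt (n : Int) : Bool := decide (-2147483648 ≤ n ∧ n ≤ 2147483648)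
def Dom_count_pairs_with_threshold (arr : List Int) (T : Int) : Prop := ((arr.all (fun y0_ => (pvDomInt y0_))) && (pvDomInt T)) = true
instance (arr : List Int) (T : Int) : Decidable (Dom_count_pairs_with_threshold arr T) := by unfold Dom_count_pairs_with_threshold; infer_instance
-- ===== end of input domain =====

-- B replaces A's divide-and-conquer recursion by an explicit work stack and flattens the nested
-- pointer loops of merge_count into one loop with one branch (objective: alternative structure).
-- Loops are ported with an exact fuel computed from the loop bounds (a totality guard only:
-- with the fuel each port is started on, fuel 0 is reached exactly when the Python loop exits).

-- ===== PORT A =====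
-- inner `while j <= right and arr[j] - arr[i] < T: j += 1`; fuel = (right + 1 - j).toNat,
-- so fuel 0 means j > right, where Python's condition is false too
def pvA_innerF (arr : List Int) (T right i : Int) : Nat → Int → Int
  | 0, j => j
  | n + 1, j =>
    if j ≤ right ∧ PySem.List.pyGetD arr j 0 - PySem.List.pyGetD arr i 0 < T then
      pvA_innerF arr T right i n (j + 1)
    else j

-- outer `while i <= mid` of merge_count, state (i, j, count); fuel = (mid + 1 - i).toNat
def pvA_outerF (arr : List Int) (T mid right : Int) : Nat → Int → Int → Int → Int
  | 0, _, _, count => count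
  | n + 1, i, j, count =>
    if i ≤ mid then
      let j' := pvA_innerF arr T right i (right + 1 - j).toNat j
      pvA_outerF arr T mid right n (i + 1) j' (count + (j' - mid - 1))
    else count

def pvA_merge (arr : List Int) (T left mid right : Int) : Int :=
  pvA_outerF arr T mid right (mid + 1 - left).toNat left (mid + 1) 0

-- dc_count; fuel = (right - left).toNat (strictly larger than both children's),
-- 0 exactly on Python's `left == right` base case (left > right only for arr = [],
-- where Python A raises RecursionError — excluded by Pre_); mid inlined
def pvA_dcF (arr : List Int) (T : Int) : Nat → Int → Int → Int
  | 0, _, _ => 0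
  | n + 1, left, right =>
    if left < right then
      pvA_dcF arr T n left (PySem.Int.floordiv (left + right) 2) +
        pvA_dcF arr T n (PySem.Int.floordiv (left + right) 2 + 1) right +
        pvA_merge arr T left (PySem.Int.floordiv (left + right) 2) right
    else 0

def count_pairs_with_threshold (arr : List Int) (T : Int) : Int :=
  pvA_dcF arr T ((arr.length : Int) - 1).toNat 0 ((arr.length : Int) - 1)

-- ===== PORT B =====
-- cross_count of Source B: one loop, one branch per step; fuel = steps left = (mid+1-i).toNat + (right+1-j).toNat
def pvB_crossF (arr : List Int) (T mid right : Int) : Nat → Int → Int → Int → Int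
  | 0, _, _, count => count
  | n + 1, i, j, count =>
    if i ≤ mid then
      if j ≤ right ∧ PySem.List.pyGetD arr j 0 - PySem.List.pyGetD arr i 0 < T then
        pvB_crossF arr T mid right n i (j + 1) count
      else
        pvB_crossF arr T mid right n (i + 1) j (count + (j - mid - 1))
    else count

def pvB_cross (arr : List Int) (T left mid right : Int) : Int :=
  pvB_crossF arr T mid right ((mid + 1 - left).toNat + (right - mid).toNat) left (mid + 1) 0

def pvB_weight (p : Int × Int) : Nat := 3 ^ (p.2 - p.1).toNat
def pvB_measure (stack : List (Int × Int)) : Nat := (stack.map pvB_weight).sum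

-- the `while stack:` loop of Source B (head of the list = top of the stack); fuel = pvB_measure,
-- which strictly decreases each iteration, so fuel 0 is reached only with an empty stack
def pvB_loopF (arr : List Int) (T : Int) : Nat → List (Int × Int) → Int → Int
  | 0, _, total => total
  | _ + 1, [], total => total
  | n + 1, (l, r) :: rest, total =>
    if l < r then
      pvB_loopF arr T n
        ((PySem.Int.floordiv (l + r) 2 + 1, r) :: (l, PySem.Int.floordiv (l + r) 2) :: rest)
        (total + pvB_cross arr T l (PySem.Int.floordiv (l + r) 2) r)
    else pvB_loopF arr T n rest total

def count_pairs_with_threshold_alt (arr : List Int) (T : Int) : Int :=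
  pvB_loopF arr T (pvB_measure [((0 : Int), (arr.length : Int) - 1)])
    [((0 : Int), (arr.length : Int) - 1)] 0

-- ===== PRECONDITION & SPEC =====
-- Pre_ excludes only the empty list, on which Python A's dc_count(0, -1) recurses forever (RecursionError).
def Pre_count_pairs_with_threshold (arr : List Int) (T : Int) : Prop := arr ≠ []
instance (arr : List Int) (T : Int) : Decidable (Pre_count_pairs_with_threshold arr T) := by
  unfold Pre_count_pairs_with_threshold; infer_instance
def pvWitness_count_pairs_with_threshold : List Int × Int := ([1, 3, 2, 5], 2)

def Spec_count_pairs_with_threshold (arr : List Int) (T : Int) (out : Int) : Prop := out = count_pairs_with_threshold_alt arr T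
instance (arr : List Int) (T : Int) (out : Int) : Decidable (Spec_count_pairs_with_threshold arr T out) := by unfold Spec_count_pairs_with_threshold; infer_instance

-- ===== CLAIM (what is proved, stated in full; the proofs are below) =====
def Claim_equal_count_pairs_with_threshold : Prop := ∀ (arr : List Int) (T : Int), Dom_count_pairs_with_threshold arr T → Pre_count_pairs_with_threshold arr T → Spec_count_pairs_with_threshold arr T (count_pairs_with_threshold arr T)

-- ===== LEMMAS AND PROOFS =====

theorem pvA_innerF_stuck (arr : List Int) (T right i j : Int) (n : Nat)
    (hj : ¬ (j ≤ right ∧ PySem.List.pyGetD arr j 0 - PySem.List.pyGetD arr i 0 < T)) :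
    pvA_innerF arr T right i n j = j := by
  cases n <;> simp [pvA_innerF, hj]

-- B's flattened cross loop computes A's nested merge_count loops, for any sufficient fuels
theorem pvB_crossF_eq_outerF (arr : List Int) (T mid right : Int) :
    ∀ (m n : Nat) (i j count : Int),
      (mid + 1 - i).toNat + (right + 1 - j).toNat ≤ m → (mid + 1 - i).toNat ≤ n →
      pvB_crossF arr T mid right m i j count = pvA_outerF arr T mid right n i j count := by
  intro m
  induction m with
  | zero =>
      intro n i j count hm hn
      have hi : ¬ i ≤ mid := by omega
      cases n <;> simp [pvB_crossF, pvA_outerF, hi]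
  | succ m ih =>
      intro n i j count hm hn
      by_cases hi : i ≤ mid
      · obtain ⟨n', rfl⟩ : ∃ n', n = n' + 1 := ⟨n - 1, by omega⟩
        by_cases hj : j ≤ right ∧ PySem.List.pyGetD arr j 0 - PySem.List.pyGetD arr i 0 < T
        · have hstep : pvB_crossF arr T mid right (m + 1) i j count
              = pvB_crossF arr T mid right m i (j + 1) count := by
            simp [pvB_crossF, hi, hj]
          have hshift : pvA_outerF arr T mid right (n' + 1) i j count
              = pvA_outerF arr T mid right (n' + 1) i (j + 1) count := by
            have hf : (right + 1 - j).toNat = (right + 1 - (j + 1)).toNat + 1 := by omega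
            simp only [pvA_outerF, if_pos hi, hf, pvA_innerF, if_pos hj]
          rw [hstep, ih (n' + 1) i (j + 1) count (by omega) (by omega), ← hshift]
        · have hstep : pvB_crossF arr T mid right (m + 1) i j count
              = pvB_crossF arr T mid right m (i + 1) j (count + (j - mid - 1)) := by
            simp [pvB_crossF, hi, hj]
          rw [hstep, ih n' (i + 1) j (count + (j - mid - 1)) (by omega) (by omega)]
          simp only [pvA_outerF, if_pos hi, pvA_innerF_stuck arr T right i j _ hj]
      · cases n <;> simp [pvB_crossF, pvA_outerF, hi]

theorem pvB_cross_eq_merge (arr : List Int) (T left mid right : Int) :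
    pvB_cross arr T left mid right = pvA_merge arr T left mid right := by
  unfold pvB_cross pvA_merge
  exact pvB_crossF_eq_outerF arr T mid right _ _ left (mid + 1) 0 (by omega) (le_refl _)

-- dc_count's value does not depend on the fuel, as long as the fuel is sufficient
theorem pvA_dcF_irrel (arr : List Int) (T : Int) :
    ∀ (n m : Nat) (l r : Int), (r - l).toNat ≤ n → (r - l).toNat ≤ m →
      pvA_dcF arr T n l r = pvA_dcF arr T m l r := by
  intro n
  induction n with
  | zero =>
      intro m l r hn _
      have hlr : ¬ l < r := by omega
      cases m <;> simp [pvA_dcF, hlr]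
  | succ n ih =>
      intro m l r hn hm
      cases m with
      | zero =>
          have hlr : ¬ l < r := by omega
          simp [pvA_dcF, hlr]
      | succ m =>
          simp only [pvA_dcF]
          by_cases h : l < r
          · have hd : PySem.Int.floordiv (l + r) 2 = (l + r) / 2 :=
              PySem.Int.floordiv_eq_ediv_of_pos (by norm_num)
            rw [if_pos h, if_pos h,
              ih m l (PySem.Int.floordiv (l + r) 2) (by omega) (by omega),
              ih m (PySem.Int.floordiv (l + r) 2 + 1) r (by omega) (by omega)]
          · rw [if_neg h, if_neg h]

theorem pvB_measure_zero {stack : List (Int × Int)} (h : pvB_measure stack ≤ 0) : stack = [] := by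
  cases stack with
  | nil => rfl
  | cons p rest =>
      exfalso
      simp [pvB_measure, pvB_weight] at h

theorem pow3_split {x y a : Nat} (hx : x < a) (hy : y < a) : 3 ^ x + 3 ^ y < 3 ^ a := by
  have h1 : 3 ^ x ≤ 3 ^ (a - 1) := Nat.pow_le_pow_right (by norm_num) (by omega)
  have h2 : 3 ^ y ≤ 3 ^ (a - 1) := Nat.pow_le_pow_right (by norm_num) (by omega)
  have h3 : 3 ^ a = 3 ^ (a - 1) * 3 := by rw [← pow_succ]; congr 1; omega
  have h4 : 1 ≤ 3 ^ (a - 1) := Nat.one_le_pow _ _ (by norm_num)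
  omega

-- B's work-stack loop totals A's dc_count over the stacked intervals
theorem pvB_loopF_eq (arr : List Int) (T : Int) :
    ∀ (f : Nat) (stack : List (Int × Int)) (total : Int), pvB_measure stack ≤ f →
      pvB_loopF arr T f stack total
        = total + (stack.map (fun p => pvA_dcF arr T (p.2 - p.1).toNat p.1 p.2)).sum := by
  intro f
  induction f with
  | zero =>
      intro stack total hf
      rw [pvB_measure_zero hf]
      simp [pvB_loopF]
  | succ f ih =>
      intro stack total hf
      match stack with
      | [] => simp [pvB_loopF]
      | (l, r) :: rest =>
          simp only [pvB_loopF]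
          by_cases h : l < r
          · rw [if_pos h]
            have hd : PySem.Int.floordiv (l + r) 2 = (l + r) / 2 :=
              PySem.Int.floordiv_eq_ediv_of_pos (by norm_num)
            have hsplit : pvB_weight (PySem.Int.floordiv (l + r) 2 + 1, r)
                + pvB_weight (l, PySem.Int.floordiv (l + r) 2) < pvB_weight (l, r) := by
              simp only [pvB_weight, hd]
              exact pow3_split (by omega) (by omega)
            have hle : pvB_measure ((PySem.Int.floordiv (l + r) 2 + 1, r)
                :: (l, PySem.Int.floordiv (l + r) 2) :: rest) ≤ f := by
              simp only [pvB_measure, List.map, List.sum_cons] at hf ⊢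
              omega
            rw [ih _ _ hle]
            obtain ⟨k, hk⟩ : ∃ k, (r - l).toNat = k + 1 := ⟨(r - l).toNat - 1, by omega⟩
            simp only [List.map, List.sum_cons, hk, pvA_dcF, if_pos h]
            rw [pvA_dcF_irrel arr T k ((PySem.Int.floordiv (l + r) 2) - l).toNat l _ (by omega) (le_refl _),
              pvA_dcF_irrel arr T k (r - (PySem.Int.floordiv (l + r) 2 + 1)).toNat _ r (by omega) (le_refl _),
              pvB_cross_eq_merge]
            ring
          · rw [if_neg h]
            have hle : pvB_measure rest ≤ f := by
              have h1 : 1 ≤ 3 ^ (r - l).toNat := Nat.one_le_pow _ _ (by norm_num)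
              simp only [pvB_measure, List.map, List.sum_cons, pvB_weight] at hf ⊢
              omega
            rw [ih _ _ hle]
            have hz : (r - l).toNat = 0 := by omega
            simp [hz, pvA_dcF]

-- ===== VERDICT (by name: the statement is the Claim_ definition above) =====
theorem count_pairs_with_threshold_spec : Claim_equal_count_pairs_with_threshold := by
  intro arr T _ _
  unfold Spec_count_pairs_with_threshold count_pairs_with_threshold count_pairs_with_threshold_alt
  rw [pvB_loopF_eq arr T _ _ _ (le_refl _)]
  simp
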